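-- pv_equiv track=rewrite | github.com/mevljas/Programming-1 | Homework/Mayoral_elections/Zupanske_volitve.py | voljeni
-- ===== SOURCE A (Python) =====
-- def voljeni(obkrozeno, imena):
--     obkrozeni = zip(obkrozeno, imena)
--     kandidat = None
--     for obkrozen, ime in obkrozeni:
--         if obkrozen:
--             if kandidat == None:
--                 kandidat = ime
--             else:
--                 return  None
--     return kandidat
-- ===== SOURCE B (Python) =====
-- def voljeni(obkrozeno, imena):
--     n = min(len(obkrozeno), len(imena))
--     if obkrozeno[:n].count(True) != 1:
--         return None
--     return imena[obkrozeno.index(True)]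
-- ===== Notes on version B (the rewrite author's own statement) =====
-- stated objective: alternative
-- what changed: Replaces A's single-slot accumulator loop with early exit by two staged passes: count the circled marks over the truncated prefix, then index imena at the first circled position when the count is exactly one.
import Mathlib
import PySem

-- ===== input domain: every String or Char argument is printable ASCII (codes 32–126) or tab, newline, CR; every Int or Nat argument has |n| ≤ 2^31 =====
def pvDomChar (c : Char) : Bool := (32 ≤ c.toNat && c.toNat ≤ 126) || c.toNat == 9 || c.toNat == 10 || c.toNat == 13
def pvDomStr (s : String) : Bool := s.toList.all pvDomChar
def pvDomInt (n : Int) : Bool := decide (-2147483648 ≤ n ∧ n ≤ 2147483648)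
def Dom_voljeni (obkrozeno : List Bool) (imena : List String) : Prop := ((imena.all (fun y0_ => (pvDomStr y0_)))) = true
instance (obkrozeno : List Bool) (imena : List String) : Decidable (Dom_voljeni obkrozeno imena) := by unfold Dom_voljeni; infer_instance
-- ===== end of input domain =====

-- B replaces A's single-slot accumulator loop with early exit by two staged passes:
-- count the True marks over the zipped prefix, then look up imena at the first True index.
-- ===== PORT A =====
-- A's loop over zip(obkrozeno, imena) with accumulator `kandidat` and early return None.
def voljeniLoop (kandidat : Option String) : List (Bool × String) → Option String
  | [] => kandidat
  | (obkrozen, ime) :: rest =>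
    if obkrozen then
      match kandidat with
      | none => voljeniLoop (some ime) rest
      | some _ => none
    else
      voljeniLoop kandidat rest

def voljeni (obkrozeno : List Bool) (imena : List String) : Option String :=
  voljeniLoop none (obkrozeno.zip imena)

-- ===== PORT B =====
-- obkrozeno[:n] with 0 ≤ n is exactly List.take n.
def voljeni_alt (obkrozeno : List Bool) (imena : List String) : Option String :=
  let n := min obkrozeno.length imena.length
  if PySem.List.count (obkrozeno.take n) true ≠ 1 then none
  else
    match PySem.List.index? obkrozeno true with
    | some k => PySem.List.pyGet? imena (k : Int)
    | none => none  -- unreachable: count = 1 guarantees a True exists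

-- ===== PRECONDITION & SPEC =====
def Spec_voljeni (obkrozeno : List Bool) (imena : List String) (out : Option String) : Prop := out = voljeni_alt obkrozeno imena
instance (obkrozeno : List Bool) (imena : List String) (out : Option String) : Decidable (Spec_voljeni obkrozeno imena out) := by unfold Spec_voljeni; infer_instance

-- ===== CLAIM (what is proved, stated in full; the proofs are below) =====
def Claim_equal_voljeni : Prop := ∀ (obkrozeno : List Bool) (imena : List String), Dom_voljeni obkrozeno imena → Spec_voljeni obkrozeno imena (voljeni obkrozeno imena)

-- ===== LEMMAS AND PROOFS =====
theorem voljeniLoop_some (a : String) (l : List (Bool × String)) :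
    voljeniLoop (some a) l =
      if (l.filter (fun p => p.1)).length = 0 then some a else none := by
  induction l with
  | nil => simp [voljeniLoop]
  | cons h t ih =>
    obtain ⟨o, n⟩ := h
    cases o <;> simp [voljeniLoop, ih, List.filter]

theorem voljeniLoop_none (l : List (Bool × String)) :
    voljeniLoop none l =
      (if ((l.filter (fun p => p.1)).map Prod.snd).length = 1
       then ((l.filter (fun p => p.1)).map Prod.snd).head? else none) := by
  induction l with
  | nil => simp [voljeniLoop]
  | cons h t ih =>
    obtain ⟨o, n⟩ := h
    cases o
    · simpa [voljeniLoop, List.filter] using ih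
    · simp [voljeniLoop, voljeniLoop_some, List.filter]
      rcases ht : t.filter (fun p => p.1) with _ | ⟨x, r⟩ <;> simp [ht]

theorem count_take_eq_filter_zip (o : List Bool) (i : List String) :
    List.count true (o.take (min o.length i.length)) =
      ((o.zip i).filter (fun p => p.1)).length := by
  induction o generalizing i with
  | nil => simp
  | cons b os ih =>
    cases i with
    | nil => simp
    | cons x xs =>
      have : min (os.length + 1) (xs.length + 1) = min os.length xs.length + 1 := by omega
      cases b <;> simp [this, ih xs]

theorem voljeni_alt_eq (o : List Bool) (i : List String) :
    voljeni_alt o i =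
      (if (((o.zip i).filter (fun p => p.1)).map Prod.snd).length = 1
       then (((o.zip i).filter (fun p => p.1)).map Prod.snd).head? else none) := by
  induction o generalizing i with
  | nil => simp [voljeni_alt]
  | cons b os ih =>
    cases i with
    | nil => simp [voljeni_alt]
    | cons x xs =>
      have hm : min (os.length + 1) (xs.length + 1) = min os.length xs.length + 1 := by omega
      cases b
      · -- false: both sides reduce to the tail case
        have := ih xs
        simp only [voljeni_alt, PySem.List.count_eq, PySem.List.index?_eq_idxOf?] at this ⊢
        simp only [List.length_cons, hm, List.take_succ_cons, List.count_cons,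
          List.idxOf?_cons, List.zip_cons_cons, List.filter] at this ⊢
        simp only [beq_iff_eq, if_false, Bool.false_eq_true] at this ⊢
        rw [← this]
        rcases os.idxOf? true with _ | k <;>
          simp [PySem.List.pyGet?_natCast]
      · -- true: first True is at index 0, name is x
        simp only [voljeni_alt, PySem.List.count_eq, PySem.List.index?_eq_idxOf?]
        simp only [List.length_cons, hm, List.take_succ_cons, List.count_cons,
          List.idxOf?_cons, List.zip_cons_cons, List.filter]
        simp only [beq_self_eq_true, if_true, reduceIte, PySem.List.pyGet?_zero_cons,
          List.length_cons, List.map_cons, List.head?_cons]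
        rw [count_take_eq_filter_zip os xs, List.length_map]
        by_cases h : (List.filter (fun p => p.1) (os.zip xs)).length = 0 <;>
          simp [h] <;> omega

-- ===== VERDICT (by name: the statement is the Claim_ definition above) =====
theorem voljeni_spec : Claim_equal_voljeni := by
  intro obkrozeno imena _
  unfold Spec_voljeni voljeni
  rw [voljeni_alt_eq, voljeniLoop_none]
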